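-- pv_equiv track=rewrite | github.com/Khladyn/Mini-Games | Chicken Crossing.py | GetBoard
-- ===== SOURCE A (Python) =====
-- size = 7
--
-- character = "&"
--
-- def GetBoard(x, y):
--
--     board = []
--
--     for i in range(size):
--
--         row = []
--         for j in range(size):
--
--             if i == y and j == x:
--                 row.append(character)
--             elif i == 0:
--                 row.append("=")
--             elif i == size-1:
--                 row.append("#")
--             else:
--                 row.append("_")
--
--         board.append(row)
--
--     return board
-- ===== SOURCE B (Python) =====
-- size = 7
--
-- character = "&"
--
-- def GetBoard(x, y):
--     # Build the whole blank board as one constant template (no per-cell or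
--     # per-row decisions), then patch the single marked cell if it is on board.
--     board = [["="] * size] + [["_"] * size for _ in range(size - 2)] + [["#"] * size]
--     if 0 <= y < size and 0 <= x < size:
--         board[y][x] = character
--     return board
-- ===== Notes on version B (the rewrite author's own statement) =====
-- stated objective: simpler
-- what changed: B builds the whole blank board as a constant template in one expression (top row, middle rows, bottom row) and then performs a single guarded patch of cell (y,x), eliminating A's nested per-cell loops with their 4-way branch.
import Mathlib
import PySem

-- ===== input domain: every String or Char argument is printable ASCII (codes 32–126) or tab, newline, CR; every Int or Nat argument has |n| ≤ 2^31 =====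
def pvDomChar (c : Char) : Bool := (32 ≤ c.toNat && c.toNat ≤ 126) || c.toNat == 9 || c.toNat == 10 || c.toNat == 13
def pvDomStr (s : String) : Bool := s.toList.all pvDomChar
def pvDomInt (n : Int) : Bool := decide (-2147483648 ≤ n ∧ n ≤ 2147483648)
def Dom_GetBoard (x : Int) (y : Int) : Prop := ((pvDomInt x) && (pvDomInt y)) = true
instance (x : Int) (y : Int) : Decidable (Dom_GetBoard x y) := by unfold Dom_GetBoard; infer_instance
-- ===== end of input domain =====

-- B builds the whole blank board as a constant template (top row, middle rows, bottom row)
-- and then patches the single marked cell (y,x) if it is on the board; objective: simpler.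

-- ===== PORT A =====
-- literal port of A: nested loops over range(size), per-cell 4-way branch
def GetBoard (x : Int) (y : Int) : List (List String) :=
  (PySem.List.pyRange 0 7 1).foldl (fun board i =>
    board ++ [ (PySem.List.pyRange 0 7 1).foldl (fun row j =>
      row ++ [ if i = y ∧ j = x then "&"
               else if i = 0 then "="
               else if i = 7 - 1 then "#"
               else "_" ]) [] ]) []

-- ===== PORT B =====
-- literal port of B: constant template board, then one guarded cell patch
def GetBoard_alt (x : Int) (y : Int) : List (List String) :=
  let board : List (List String) :=
    [List.replicate 7 "="] ++ List.replicate (7 - 2) (List.replicate 7 "_") ++ [List.replicate 7 "#"]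
  if 0 ≤ y ∧ y < 7 ∧ 0 ≤ x ∧ x < 7 then
    board.set y.toNat ((board.getD y.toNat []).set x.toNat "&")
  else board

-- ===== PRECONDITION & SPEC =====
def Spec_GetBoard (x : Int) (y : Int) (out : List (List String)) : Prop := out = GetBoard_alt x y
instance (x : Int) (y : Int) (out : List (List String)) : Decidable (Spec_GetBoard x y out) := by unfold Spec_GetBoard; infer_instance

-- ===== CLAIM (what is proved, stated in full; the proofs are below) =====
def Claim_equal_GetBoard : Prop := ∀ (x : Int) (y : Int), Dom_GetBoard x y → Spec_GetBoard x y (GetBoard x y)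

-- ===== LEMMAS AND PROOFS =====

theorem getboard_eq (x y : Int) : GetBoard x y = GetBoard_alt x y := by
  by_cases hy : 0 ≤ y ∧ y < 7
  · by_cases hx : 0 ≤ x ∧ x < 7
    · obtain ⟨hy1, hy2⟩ := hy
      obtain ⟨hx1, hx2⟩ := hx
      interval_cases x <;> interval_cases y <;> decide
    · -- x out of range: no cell is ever patched on either side
      have h0 : ¬((0:Int) = x) := by omega
      have h1 : ¬((1:Int) = x) := by omega
      have h2 : ¬((2:Int) = x) := by omega
      have h3 : ¬((3:Int) = x) := by omega
      have h4 : ¬((4:Int) = x) := by omega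
      have h5 : ¬((5:Int) = x) := by omega
      have h6 : ¬((6:Int) = x) := by omega
      have hx' : ¬(0 ≤ y ∧ y < 7 ∧ 0 ≤ x ∧ x < 7) := by omega
      simp [GetBoard, GetBoard_alt, PySem.List.pyRange_one, List.range_succ,
            h0, h1, h2, h3, h4, h5, h6, hx']
  · -- y out of range: no row is ever patched on either side
    have h0 : ¬((0:Int) = y) := by omega
    have h1 : ¬((1:Int) = y) := by omega
    have h2 : ¬((2:Int) = y) := by omega
    have h3 : ¬((3:Int) = y) := by omega
    have h4 : ¬((4:Int) = y) := by omega
    have h5 : ¬((5:Int) = y) := by omega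
    have h6 : ¬((6:Int) = y) := by omega
    have hy' : ¬(0 ≤ y ∧ y < 7 ∧ 0 ≤ x ∧ x < 7) := by omega
    simp [GetBoard, GetBoard_alt, PySem.List.pyRange_one, List.range_succ,
          h0, h1, h2, h3, h4, h5, h6, hy']

-- ===== VERDICT (by name: the statement is the Claim_ definition above) =====
theorem GetBoard_spec : Claim_equal_GetBoard := by
  intro x y _
  unfold Spec_GetBoard
  exact getboard_eq x y
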